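-- pv_equiv track=rewrite | github.com/ArR4e/DSProject | processed/K05/S013/kodu3.py | moos
-- ===== SOURCE A (Python) =====
-- def moos(a,b,c):
--     i = 0
--     while a > 0 and c >= 5:
--         c = c - 5
--         a -= 1
--         i += 1
--     while b > 0 and c >= 1: #1 või 0
--         c = c - 1
--         b -= 1
--         i += 1
--     if c > 0 and b <= 0:
--         return -1
--     else:
--         return i
-- ===== SOURCE B (Python) =====
-- def moos(a, b, c):
--     k1 = max(0, min(a, c // 5))
--     c -= 5 * k1
--     k2 = max(0, min(b, c))
--     return -1 if c - k2 > 0 and b - k2 <= 0 else k1 + k2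
-- ===== Notes on version B (the rewrite author's own statement) =====
-- stated objective: faster
-- what changed: Replaced both decrement-by-one while loops with closed-form iteration counts k1=max(0,min(a,c//5)) and k2=max(0,min(b,c-5*k1)), then the same final check.
import Mathlib
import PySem

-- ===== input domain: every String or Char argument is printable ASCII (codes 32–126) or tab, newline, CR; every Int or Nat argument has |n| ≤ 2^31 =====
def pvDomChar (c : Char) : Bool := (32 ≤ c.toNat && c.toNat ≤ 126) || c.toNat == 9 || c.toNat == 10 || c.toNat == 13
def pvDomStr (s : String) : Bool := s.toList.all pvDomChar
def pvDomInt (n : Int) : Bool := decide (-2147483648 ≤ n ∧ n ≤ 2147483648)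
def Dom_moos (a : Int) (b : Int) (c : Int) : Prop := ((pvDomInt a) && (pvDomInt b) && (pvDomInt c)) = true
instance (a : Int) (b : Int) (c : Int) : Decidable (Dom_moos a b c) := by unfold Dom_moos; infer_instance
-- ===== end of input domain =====

-- B replaces both decrement-by-one while loops with closed-form counts (O(1) instead of O(a+b)).


-- ===== PORT A =====
-- first while loop: state (a, c, i)
def moosLoop1 (a c i : Int) : Int × Int × Int :=
  if a > 0 ∧ c ≥ 5 then moosLoop1 (a - 1) (c - 5) (i + 1) else (a, c, i)
termination_by a.toNat
decreasing_by omega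

-- second while loop: state (b, c, i)
def moosLoop2 (b c i : Int) : Int × Int × Int :=
  if b > 0 ∧ c ≥ 1 then moosLoop2 (b - 1) (c - 1) (i + 1) else (b, c, i)
termination_by b.toNat
decreasing_by omega

def moos (a : Int) (b : Int) (c : Int) : Int :=
  let s1 := moosLoop1 a c 0
  let s2 := moosLoop2 b s1.2.1 s1.2.2
  if s2.2.1 > 0 ∧ s2.1 ≤ 0 then -1 else s2.2.2

-- ===== PORT B =====
def moos_alt (a : Int) (b : Int) (c : Int) : Int :=
  let k1 := max 0 (min a (PySem.Int.floordiv c 5))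
  let c1 := c - 5 * k1
  let k2 := max 0 (min b c1)
  if c1 - k2 > 0 ∧ b - k2 ≤ 0 then -1 else k1 + k2

-- ===== PRECONDITION & SPEC =====
def Spec_moos (a : Int) (b : Int) (c : Int) (out : Int) : Prop := out = moos_alt a b c
instance (a : Int) (b : Int) (c : Int) (out : Int) : Decidable (Spec_moos a b c out) := by unfold Spec_moos; infer_instance

-- ===== CLAIM (what is proved, stated in full; the proofs are below) =====
def Claim_equal_moos : Prop := ∀ (a : Int) (b : Int) (c : Int), Dom_moos a b c → Spec_moos a b c (moos a b c)

-- ===== LEMMAS AND PROOFS =====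

theorem moosLoop1_eq (a c i : Int) :
    moosLoop1 a c i =
      (a - max 0 (min a (PySem.Int.floordiv c 5)),
       c - 5 * max 0 (min a (PySem.Int.floordiv c 5)),
       i + max 0 (min a (PySem.Int.floordiv c 5))) := by
  fun_induction moosLoop1 a c i with
  | case1 a c i h ih =>
    rw [ih]
    have h5 : (0 : Int) < 5 := by norm_num
    have e1 : PySem.Int.floordiv c 5 = c / 5 := PySem.Int.floordiv_eq_ediv_of_pos h5
    have e2 : PySem.Int.floordiv (c - 5) 5 = (c - 5) / 5 := PySem.Int.floordiv_eq_ediv_of_pos h5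
    rw [e1, e2]
    have hd : (c - 5) / 5 = c / 5 - 1 := by omega
    have hc5 : 1 ≤ c / 5 := by omega
    rw [hd]
    refine Prod.ext ?_ (Prod.ext ?_ ?_) <;> simp <;> omega
  | case2 a c i h =>
    have h5 : (0 : Int) < 5 := by norm_num
    have e1 : PySem.Int.floordiv c 5 = c / 5 := PySem.Int.floordiv_eq_ediv_of_pos h5
    rw [e1]
    have : max 0 (min a (c / 5)) = 0 := by
      rcases not_and_or.mp h with h' | h' <;> omega
    rw [this]
    refine Prod.ext ?_ (Prod.ext ?_ ?_) <;> simp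

theorem moosLoop2_eq (b c i : Int) :
    moosLoop2 b c i =
      (b - max 0 (min b c), c - max 0 (min b c), i + max 0 (min b c)) := by
  fun_induction moosLoop2 b c i with
  | case1 b c i h ih =>
    rw [ih]
    refine Prod.ext ?_ (Prod.ext ?_ ?_) <;> simp <;> omega
  | case2 b c i h =>
    have : max 0 (min b c) = 0 := by rcases not_and_or.mp h with h' | h' <;> omega
    rw [this]
    refine Prod.ext ?_ (Prod.ext ?_ ?_) <;> simp

-- ===== VERDICT (by name: the statement is the Claim_ definition above) =====
theorem moos_spec : Claim_equal_moos := by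
  intro a b c _
  unfold Spec_moos
  simp only [moos, moos_alt, moosLoop1_eq, moosLoop2_eq]
  have h5 : (0 : Int) < 5 := by norm_num
  rw [PySem.Int.floordiv_eq_ediv_of_pos h5]
  set k1 := max 0 (min a (c / 5)) with hk1
  set c1 := c - 5 * k1 with hc1
  set k2 := max 0 (min b c1) with hk2
  split_ifs with h1 h2 h2 <;> first
    | rfl
    | (exfalso; omega)
    | omega
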